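-- pv_equiv track=rewrite | github.com/trgt26/lab | hill_2by2.py | matrix_inverse_2x2
-- ===== SOURCE A (Python) =====
-- def mod_inverse(a, m):
--     """Find modular inverse of a mod m using brute-force"""
--     a %= m
--     for x in range(1, m):
--         if (a * x) % m == 1:
--             return x
--     raise Exception(f"No modular inverse for {a} mod {m}")
--
-- def matrix_inverse_2x2(matrix):
--     """Find inverse of 2x2 matrix modulo 26"""
--     det = (matrix[0][0]*matrix[1][1] - matrix[0][1]*matrix[1][0]) % 26
--     det_inv = mod_inverse(det, 26)
--
--     # Adjugate and apply modular inverse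
--     inv = [
--         [( matrix[1][1] * det_inv) % 26, (-matrix[0][1] * det_inv) % 26],
--         [(-matrix[1][0] * det_inv) % 26, ( matrix[0][0] * det_inv) % 26]
--     ]
--     # Ensure all elements are positive mod 26
--     for i in range(2):
--         for j in range(2):
--             inv[i][j] %= 26
--     return inv
-- ===== SOURCE B (Python) =====
-- def matrix_inverse_2x2(matrix):
--     """Find inverse of 2x2 matrix modulo 26 (extended Euclid for the modular inverse)"""
--     a, b = matrix[0][0], matrix[0][1]
--     c, d = matrix[1][0], matrix[1][1]
--     det = (a * d - b * c) % 26
--     # extended Euclidean algorithm on (det, 26)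
--     old_r, r = det, 26
--     old_s, s = 1, 0
--     while r != 0:
--         q = old_r // r
--         old_r, r = r, old_r - q * r
--         old_s, s = s, old_s - q * s
--     if old_r != 1:
--         raise Exception(f"No modular inverse for {det} mod 26")
--     inv = old_s % 26
--     return [[d * inv % 26, -b * inv % 26], [-c * inv % 26, a * inv % 26]]
-- ===== Notes on version B (the rewrite author's own statement) =====
-- stated objective: faster
-- what changed: The modular inverse is computed by the iterative extended Euclidean algorithm (Bezout coefficient of det and 26) instead of brute-force trial of all residues 1..25, and the redundant second mod-26 reduction pass is dropped.
import Mathlib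
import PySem

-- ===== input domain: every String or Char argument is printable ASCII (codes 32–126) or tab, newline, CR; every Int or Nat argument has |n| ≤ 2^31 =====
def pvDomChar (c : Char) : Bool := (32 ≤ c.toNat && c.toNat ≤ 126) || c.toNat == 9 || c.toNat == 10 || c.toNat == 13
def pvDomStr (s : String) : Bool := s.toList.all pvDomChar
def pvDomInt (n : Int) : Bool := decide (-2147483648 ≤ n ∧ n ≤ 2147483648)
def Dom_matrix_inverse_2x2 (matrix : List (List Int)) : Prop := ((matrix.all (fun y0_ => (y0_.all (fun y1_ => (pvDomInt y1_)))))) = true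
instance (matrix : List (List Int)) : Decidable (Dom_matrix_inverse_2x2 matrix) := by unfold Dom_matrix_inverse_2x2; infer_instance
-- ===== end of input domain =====

-- B replaces A's brute-force trial loop for the modular inverse by the iterative extended
-- Euclidean algorithm and drops A's redundant second mod-26 pass (objective: alternative algorithm).

-- ===== PORT A =====
-- matrix[i][j]; the .getD defaults are only reached when Python raises IndexError (outside Pre_)
def pvEntry (matrix : List (List Int)) (i j : Int) : Int :=
  ((PySem.List.pyGet? matrix i).bind (fun r => PySem.List.pyGet? r j)).getD 0

-- mod_inverse: a %= m, then scan range(1, m) for the first x with (a*x) % m == 1; none = Exception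
def mod_inverseA (a m : Int) : Option Int :=
  let a := PySem.Int.mod a m
  (PySem.List.pyRange 1 m 1).find? (fun x => PySem.Int.mod (a * x) m == 1)

def matrix_inverse_2x2 (matrix : List (List Int)) : List (List Int) :=
  let det := PySem.Int.mod (pvEntry matrix 0 0 * pvEntry matrix 1 1
                            - pvEntry matrix 0 1 * pvEntry matrix 1 0) 26
  let det_inv := (mod_inverseA det 26).getD 0   -- none = Exception, excluded by Pre_
  let inv := [[PySem.Int.mod (pvEntry matrix 1 1 * det_inv) 26,
               PySem.Int.mod (-pvEntry matrix 0 1 * det_inv) 26],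
              [PySem.Int.mod (-pvEntry matrix 1 0 * det_inv) 26,
               PySem.Int.mod (pvEntry matrix 0 0 * det_inv) 26]]
  -- the final two for-loops: inv[i][j] %= 26 for all i, j
  inv.map (fun row => row.map (fun x => PySem.Int.mod x 26))

-- ===== PORT B =====
-- the while loop of the extended Euclidean algorithm; fuel 64 exceeds any possible
-- iteration count for the arguments used (det ∈ [0,26), 26); returns (old_r, old_s)
def pvEgcdLoop : Nat → Int → Int → Int → Int → Int × Int
  | 0, old_r, _, old_s, _ => (old_r, old_s)
  | Nat.succ n, old_r, r, old_s, s =>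
    if r = 0 then (old_r, old_s)
    else
      let q := PySem.Int.floordiv old_r r
      pvEgcdLoop n r (old_r - q * r) s (old_s - q * s)

def matrix_inverse_2x2_alt (matrix : List (List Int)) : List (List Int) :=
  let a := pvEntry matrix 0 0
  let b := pvEntry matrix 0 1
  let c := pvEntry matrix 1 0
  let d := pvEntry matrix 1 1
  let det := PySem.Int.mod (a * d - b * c) 26
  let g := pvEgcdLoop 64 det 26 1 0
  if g.1 ≠ 1 then []   -- raise Exception; excluded by Pre_
  else
    let inv := PySem.Int.mod g.2 26
    [[PySem.Int.mod (d * inv) 26, PySem.Int.mod (-b * inv) 26],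
     [PySem.Int.mod (-c * inv) 26, PySem.Int.mod (a * inv) 26]]

-- ===== PRECONDITION & SPEC =====
-- Pre_ excludes exactly the inputs where Python A raises: matrices without entries
-- [0][0],[0][1],[1][0],[1][1] (IndexError) and determinants not coprime to 26 (Exception).
def Pre_matrix_inverse_2x2 (matrix : List (List Int)) : Prop :=
  2 ≤ matrix.length ∧ 2 ≤ (matrix.getD 0 []).length ∧ 2 ≤ (matrix.getD 1 []).length ∧
  Int.gcd (((matrix.getD 0 []).getD 0 0 * (matrix.getD 1 []).getD 1 0
            - (matrix.getD 0 []).getD 1 0 * (matrix.getD 1 []).getD 0 0) % 26) 26 = 1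
instance (matrix : List (List Int)) : Decidable (Pre_matrix_inverse_2x2 matrix) := by
  unfold Pre_matrix_inverse_2x2; infer_instance

def pvWitness_matrix_inverse_2x2 : List (List Int) := [[1, 2], [3, 5]]

def Spec_matrix_inverse_2x2 (matrix : List (List Int)) (out : List (List Int)) : Prop := out = matrix_inverse_2x2_alt matrix
instance (matrix : List (List Int)) (out : List (List Int)) : Decidable (Spec_matrix_inverse_2x2 matrix out) := by unfold Spec_matrix_inverse_2x2; infer_instance

-- ===== CLAIM (what is proved, stated in full; the proofs are below) =====
def Claim_equal_matrix_inverse_2x2 : Prop := ∀ (matrix : List (List Int)), Dom_matrix_inverse_2x2 matrix → Pre_matrix_inverse_2x2 matrix → Spec_matrix_inverse_2x2 matrix (matrix_inverse_2x2 matrix)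

-- ===== LEMMAS AND PROOFS =====

-- For every residue D coprime to 26, A's brute-force inverse equals B's Euclid inverse,
-- and B's gcd is 1; checked by evaluation on the 26 possible residues.
lemma key (D : Int) (h0 : 0 ≤ D) (h1 : D < 26) (hg : Int.gcd D 26 = 1) :
    (pvEgcdLoop 64 D 26 1 0).1 = 1 ∧
    (mod_inverseA D 26).getD 0 = PySem.Int.mod (pvEgcdLoop 64 D 26 1 0).2 26 := by
  interval_cases D <;> revert hg <;> decide

lemma mod26_idem (x : Int) :
    PySem.Int.mod (PySem.Int.mod x 26) 26 = PySem.Int.mod x 26 := by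
  simp [Int.emod_emod_of_dvd x (dvd_refl 26)]

-- ===== VERDICT (by name: the statement is the Claim_ definition above) =====
theorem matrix_inverse_2x2_spec : Claim_equal_matrix_inverse_2x2 := by
  intro matrix _ hpre
  obtain ⟨h1, h2, h3, hg⟩ := hpre
  unfold Spec_matrix_inverse_2x2 matrix_inverse_2x2 matrix_inverse_2x2_alt
  match matrix, h1 with
  | r0 :: r1 :: rest, _ =>
    match r0, h2 with
    | x00 :: x01 :: t0, _ =>
      match r1, h3 with
      | x10 :: x11 :: t1, _ =>
        simp only [List.getD, List.getElem?_cons_zero, List.getElem?_cons_succ,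
          Option.getD_some] at hg
        have hdet : PySem.Int.mod (x00 * x11 - x01 * x10) 26
            = (x00 * x11 - x01 * x10) % 26 :=
          PySem.Int.mod_eq_emod_of_pos (by norm_num)
        set D := PySem.Int.mod (x00 * x11 - x01 * x10) 26 with hD
        have h0 : 0 ≤ D := PySem.Int.mod_nonneg _ (by norm_num)
        have hlt : D < 26 := PySem.Int.mod_lt _ (by norm_num)
        have hgD : Int.gcd D 26 = 1 := by rw [hdet]; exact hg
        obtain ⟨kg, ki⟩ := key D h0 hlt hgD
        have hE : pvEntry (( x00 :: x01 :: t0) :: (x10 :: x11 :: t1) :: rest) 0 0 = x00 ∧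
                  pvEntry (( x00 :: x01 :: t0) :: (x10 :: x11 :: t1) :: rest) 0 1 = x01 ∧
                  pvEntry (( x00 :: x01 :: t0) :: (x10 :: x11 :: t1) :: rest) 1 0 = x10 ∧
                  pvEntry (( x00 :: x01 :: t0) :: (x10 :: x11 :: t1) :: rest) 1 1 = x11 := by
          refine ⟨?_, ?_, ?_, ?_⟩ <;>
            simp [pvEntry, PySem.List.pyGet?, PySem.List.pyIdx?,
              (show (0:Int) ≤ (rest.length:Int) + 1 by positivity),
              (show (1:Int) < (rest.length:Int) + 1 + 1 by omega)]
        simp only [hE.1, hE.2.1, hE.2.2.1, hE.2.2.2, ← hD, kg, ki,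
          List.map_cons, List.map_nil, mod26_idem]
        simp
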